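-- pv_equiv track=rewrite | github.com/zmarffy/debpacker | debpacker/__main__.py | _parse_changelog
-- ===== SOURCE A (Python) =====
-- def _parse_changelog(s):
--     if s is None or s == "":
--         return None, None
--     elif s == "auto":
--         return "auto", None
--     else:
--         option, message = "message", s  # Default
--         for o in ["message", "from_commit_id"]:
--             if s.startswith(o + "="):
--                 option = o
--                 message = s.split("=", 1)[1]
--                 break
--         return option, message
-- ===== SOURCE B (Python) =====
-- # B: walk the string through a character trie of the recognised "key=" prefixes
-- # instead of looping startswith over candidate keys.
--
-- def _chain(word, value):
--     node = {"": value}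
--     for c in reversed(word):
--         node = {c: node}
--     return node
--
--
-- _TRIE = {}
-- for _w, _v in (("message=", "message"), ("from_commit_id=", "from_commit_id")):
--     _TRIE.update(_chain(_w, _v))
--
--
-- def _walk(node, s):
--     if not s:
--         return None
--     child = node.get(s[0])
--     if child is None:
--         return None
--     if "" in child:
--         return child[""], s[1:]
--     return _walk(child, s[1:])
--
--
-- def _parse_changelog(s):
--     if s is None or s == "":
--         return None, None
--     if s == "auto":
--         return "auto", None
--     res = _walk(_TRIE, s)
--     if res is None:
--         return "message", s
--     return res
-- ===== Notes on version B (the rewrite author's own statement) =====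
-- stated objective: alternative
-- what changed: Replaces A's startswith-loop over candidate option names (plus a separate split) by a character trie built from the recognised 'key=' prefixes and a single recursive walk of the string through it, which yields the matched option and the remaining message at the accept node.
import Mathlib
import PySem

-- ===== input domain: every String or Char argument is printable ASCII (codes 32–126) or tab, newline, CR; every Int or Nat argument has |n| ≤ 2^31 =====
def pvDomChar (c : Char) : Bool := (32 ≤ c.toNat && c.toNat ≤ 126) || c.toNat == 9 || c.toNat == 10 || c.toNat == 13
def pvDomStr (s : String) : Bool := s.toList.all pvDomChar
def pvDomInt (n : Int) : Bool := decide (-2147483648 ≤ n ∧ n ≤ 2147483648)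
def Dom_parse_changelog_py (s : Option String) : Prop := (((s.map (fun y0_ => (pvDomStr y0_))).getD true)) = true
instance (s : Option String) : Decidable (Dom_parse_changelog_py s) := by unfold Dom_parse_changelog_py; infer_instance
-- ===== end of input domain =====

-- B walks the string through a character trie of the recognised "key=" prefixes instead of A's startswith-loop (alternative algorithm; same cost).

-- ===== PORT A =====
-- the for-loop with break: first matching prefix wins, [] = loop fell through
def pvLoopA (t : String) : List String → String × String
  | [] => ("message", t)
  | o :: os =>
    if PySem.Str.startswith t (o ++ "=") then
      -- s.split("=", 1)[1]; when called, t contains "=", so index 1 exists (exact here)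
      (o, (PySem.List.pyGet? ((PySem.Str.splitMax? t "=" 1).getD []) 1).getD "")
    else pvLoopA t os

def parse_changelog_py (s : Option String) : Option String × Option String :=
  match s with
  | none => (none, none)
  | some t =>
    if t = "" then (none, none)
    else if t = "auto" then (some "auto", none)
    else
      let r := pvLoopA t ["message", "from_commit_id"]
      (some r.1, some r.2)

-- ===== PORT B =====
-- trie nodes (the Python dicts): optional accept value (the '""' key) plus child edges; mutual pair
mutual
inductive PvTrie where
  | node : Option String → PvKids → PvTrie
inductive PvKids where
  | nil : PvKids
  | cons : Char → PvTrie → PvKids → PvKids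
end

-- _chain: a single chain of nodes spelling `word`, accepting with `value` at the end
def pvChain (value : String) : List Char → PvTrie
  | [] => .node (some value) .nil
  | c :: cs => .node none (.cons c (pvChain value cs) .nil)

def pvKidsOf : PvTrie → PvKids
  | .node _ k => k

def pvKidsAppend : PvKids → PvKids → PvKids
  | .nil, k => k
  | .cons c t rest, k => .cons c t (pvKidsAppend rest k)

-- _TRIE = {} updated with the two chains (their first characters are distinct)
def pvTrieRoot : PvTrie :=
  .node none (pvKidsAppend (pvKidsOf (pvChain "message" "message=".toList))
                            (pvKidsOf (pvChain "from_commit_id" "from_commit_id=".toList)))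

def pvFind : PvKids → Char → Option PvTrie
  | .nil, _ => none
  | .cons c t rest, d => if d = c then some t else pvFind rest d

-- _walk: follow the trie along the string; at an accept node return (value, rest of the string)
def pvWalk : PvTrie → List Char → Option (String × List Char)
  | _, [] => none
  | .node _ kids, c :: cs =>
    match pvFind kids c with
    | none => none
    | some child =>
      match child with
      | .node (some v) _ => some (v, cs)
      | .node none _ => pvWalk child cs
termination_by _ cs => cs.length

def parse_changelog_py_alt (s : Option String) : Option String × Option String :=
  match s with
  | none => (none, none)
  | some t =>
    if t = "" then (none, none)
    else if t = "auto" then (some "auto", none)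
    else
      match pvWalk pvTrieRoot t.toList with
      | some (v, rest) => (some v, some (String.ofList rest))
      | none => (some "message", some t)

-- ===== PRECONDITION & SPEC =====
def Spec_parse_changelog_py (s : Option String) (out : Option String × Option String) : Prop := out = parse_changelog_py_alt s
instance (s : Option String) (out : Option String × Option String) : Decidable (Spec_parse_changelog_py s out) := by unfold Spec_parse_changelog_py; infer_instance

-- ===== CLAIM (what is proved, stated in full; the proofs are below) =====
def Claim_equal_parse_changelog_py : Prop := ∀ (s : Option String), Dom_parse_changelog_py s → Spec_parse_changelog_py s (parse_changelog_py s)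

-- ===== LEMMAS AND PROOFS =====

-- once the maxsplit budget is exhausted, go just flushes the remainder
lemma pvGoZero (fuel : Nat) (r cur : List Char) (acc : List (List Char)) :
    PySem.Chars.splitOnMax.go ['='] fuel 0 r cur acc = ((cur.reverse ++ r) :: acc).reverse := by
  cases fuel with
  | zero => simp [PySem.Chars.splitOnMax.go]
  | succ f => cases r <;> simp [PySem.Chars.splitOnMax.go]

lemma pvGoScan (a : List Char) : ∀ (fuel : Nat) (r cur : List Char) (acc : List (List Char)),
    '=' ∉ a → a.length + r.length + 1 ≤ fuel →
    PySem.Chars.splitOnMax.go ['='] fuel 1 (a ++ '=' :: r) cur acc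
      = acc.reverse ++ [cur.reverse ++ a, r] := by
  induction a with
  | nil =>
    intro fuel r cur acc _ hfuel
    cases fuel with
    | zero => omega
    | succ f =>
      simp only [List.nil_append, PySem.Chars.splitOnMax.go]
      simp [List.isPrefixOf, pvGoZero]
  | cons c a ih =>
    intro fuel r cur acc hne hfuel
    cases fuel with
    | zero => simp at hfuel
    | succ f =>
      have hc : c ≠ '=' := fun h => hne (by simp [h])
      simp only [List.cons_append, PySem.Chars.splitOnMax.go]
      rw [if_neg (by omega), if_neg (by simp [List.isPrefixOf]; exact fun h => (hc h.symm).elim)]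
      rw [ih f r (c :: cur) acc (fun h => hne (List.mem_cons_of_mem _ h)) (by simp at hfuel ⊢; omega)]
      simp

lemma pvSplitMaxEq (a r : List Char) (h : '=' ∉ a) :
    PySem.Chars.splitMax? (a ++ '=' :: r) ['='] 1 = some [a, r] := by
  simp only [PySem.Chars.splitMax?, PySem.Chars.splitOnMax]
  norm_num
  rw [pvGoScan a _ r [] [] h (by simp)]
  simp

lemma pvStrSplit (t : String) (a r : List Char) (ht : t.toList = a ++ '=' :: r) (h : '=' ∉ a) :
    PySem.Str.splitMax? t "=" 1 = some [String.ofList a, String.ofList r] := by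
  simp only [PySem.Str.splitMax?]
  have : ("=" : String).toList = ['='] := rfl
  rw [ht, this, pvSplitMaxEq a r h]
  rfl

lemma pvStartsOf (t : String) (key r : List Char) (ht : t.toList = key ++ '=' :: r) (p : String)
    (hp : p.toList = key ++ ['=']) : PySem.Str.startswith t p = true := by
  simp only [PySem.Str.startswith]
  rw [PySem.Chars.startswith_iff, hp, ht]
  exact ⟨r, by simp⟩

-- walking a nonempty chain along its own word reaches the accept node
lemma pvWalkChainComplete (v : String) : ∀ (w r : List Char), w ≠ [] →
    pvWalk (pvChain v w) (w ++ r) = some (v, r) := by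
  intro w
  induction w with
  | nil => intro r h; exact absurd rfl h
  | cons c w ih =>
    intro r _
    cases w with
    | nil => simp [pvChain, pvWalk, pvFind]
    | cons d w =>
      simp only [pvChain, List.cons_append, pvWalk, pvFind]
      exact ih r (by simp)

-- a successful chain walk forces the string to extend the chain's word
lemma pvWalkChainSound (v : String) : ∀ (w cs : List Char) (p : String × List Char),
    pvWalk (pvChain v w) cs = some p → ∃ r, cs = w ++ r ∧ p = (v, r) := by
  intro w
  induction w with
  | nil =>
    intro cs p h
    cases cs with
    | nil => simp [pvWalk] at h
    | cons d cs => simp [pvChain, pvWalk, pvFind] at h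
  | cons c w ih =>
    intro cs p h
    cases cs with
    | nil => simp [pvWalk] at h
    | cons d cs =>
      simp only [pvChain, pvWalk, pvFind] at h
      by_cases hdc : d = c
      · rw [if_pos hdc] at h
        cases w with
        | nil =>
          simp only [pvChain, Option.some.injEq] at h
          exact ⟨cs, by simp [hdc], h.symm⟩
        | cons e w =>
          simp only [pvChain] at h
          rcases ih cs p h with ⟨r, hcs, hp⟩
          refine ⟨r, ?_, hp⟩
          simp [hdc] at hcs ⊢
          exact hcs
      · rw [if_neg hdc] at h; simp at h

-- the root laid out as explicit constructors
lemma pvRootEq : pvTrieRoot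
    = PvTrie.node none (PvKids.cons 'm' (pvChain "message" "essage=".toList)
        (PvKids.cons 'f' (pvChain "from_commit_id" "rom_commit_id=".toList) PvKids.nil)) := rfl

lemma pvRootStepM (cs : List Char) :
    pvWalk pvTrieRoot ('m' :: cs) = pvWalk (pvChain "message" "essage=".toList) cs := by
  have h : pvChain "message" "essage=".toList
      = PvTrie.node none (PvKids.cons 'e' (pvChain "message" "ssage=".toList) PvKids.nil) := rfl
  rw [pvRootEq]
  simp only [pvWalk, pvFind]
  rw [h]
  simp

lemma pvRootStepF (cs : List Char) :
    pvWalk pvTrieRoot ('f' :: cs) = pvWalk (pvChain "from_commit_id" "rom_commit_id=".toList) cs := by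
  have h : pvChain "from_commit_id" "rom_commit_id=".toList
      = PvTrie.node none (PvKids.cons 'r' (pvChain "from_commit_id" "om_commit_id=".toList) PvKids.nil) := rfl
  rw [pvRootEq]
  simp only [pvWalk, pvFind]
  rw [h]
  simp

lemma pvRootM (r : List Char) :
    pvWalk pvTrieRoot ("message".toList ++ '=' :: r) = some ("message", r) := by
  have h : "message".toList ++ '=' :: r = 'm' :: ("essage=".toList ++ r) := rfl
  rw [h, pvRootStepM]
  exact pvWalkChainComplete "message" "essage=".toList r (by decide)

lemma pvRootF (r : List Char) :
    pvWalk pvTrieRoot ("from_commit_id".toList ++ '=' :: r) = some ("from_commit_id", r) := by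
  have h : "from_commit_id".toList ++ '=' :: r = 'f' :: ("rom_commit_id=".toList ++ r) := rfl
  rw [h, pvRootStepF]
  exact pvWalkChainComplete "from_commit_id" "rom_commit_id=".toList r (by decide)

lemma pvRootSound (cs : List Char) (p : String × List Char)
    (h : pvWalk pvTrieRoot cs = some p) :
    (∃ r, cs = "message".toList ++ '=' :: r ∧ p = ("message", r)) ∨
    (∃ r, cs = "from_commit_id".toList ++ '=' :: r ∧ p = ("from_commit_id", r)) := by
  cases cs with
  | nil => simp [pvWalk] at h
  | cons c cs =>
    by_cases hm : c = 'm'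
    · subst hm
      rw [pvRootStepM] at h
      rcases pvWalkChainSound _ _ _ _ h with ⟨r, hcs, hp⟩
      left
      exact ⟨r, by rw [hcs]; rfl, hp⟩
    · by_cases hf : c = 'f'
      · subst hf
        rw [pvRootStepF] at h
        rcases pvWalkChainSound _ _ _ _ h with ⟨r, hcs, hp⟩
        right
        exact ⟨r, by rw [hcs]; rfl, hp⟩
      · rw [pvRootEq] at h
        simp [pvWalk, pvFind, hm, hf] at h

-- the main case: t nonempty, not "auto"
lemma pvMain (t : String) :
    (let r := pvLoopA t ["message", "from_commit_id"]; ((some r.1, some r.2) : Option String × Option String))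
      = (match pvWalk pvTrieRoot t.toList with
         | some (v, rest) => ((some v, some (String.ofList rest)) : Option String × Option String)
         | none => (some "message", some t)) := by
  by_cases h1 : PySem.Str.startswith t ("message" ++ "=") = true
  · rcases (PySem.Chars.startswith_iff _ _).mp h1 with ⟨r, hr⟩
    have ht : t.toList = "message".toList ++ '=' :: r := by
      have : ("message" ++ "=" : String).toList = "message".toList ++ ['='] := rfl
      rw [this] at hr; simpa using hr.symm
    simp only [pvLoopA, h1, if_pos]
    rw [ht, pvRootM, pvStrSplit t _ r ht (by decide)]
    simp [PySem.List.pyGet?, PySem.List.pyIdx?]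
  · by_cases h2 : PySem.Str.startswith t ("from_commit_id" ++ "=") = true
    · rcases (PySem.Chars.startswith_iff _ _).mp h2 with ⟨r, hr⟩
      have ht : t.toList = "from_commit_id".toList ++ '=' :: r := by
        have : ("from_commit_id" ++ "=" : String).toList = "from_commit_id".toList ++ ['='] := rfl
        rw [this] at hr; simpa using hr.symm
      simp only [pvLoopA, h1, h2, if_pos, if_neg, Bool.not_eq_true]
      rw [ht, pvRootF, pvStrSplit t _ r ht (by decide)]
      simp [PySem.List.pyGet?, PySem.List.pyIdx?]
    · simp only [pvLoopA, h1, h2, if_neg, Bool.not_eq_true]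
      cases heq : pvWalk pvTrieRoot t.toList with
      | none => rfl
      | some p =>
        rcases pvRootSound _ _ heq with ⟨r, hcs, _⟩ | ⟨r, hcs, _⟩
        · exact absurd (pvStartsOf t _ r hcs ("message" ++ "=") rfl) h1
        · exact absurd (pvStartsOf t _ r hcs ("from_commit_id" ++ "=") rfl) h2

-- ===== VERDICT (by name: the statement is the Claim_ definition above) =====
theorem parse_changelog_py_spec : Claim_equal_parse_changelog_py := by
  intro s _
  unfold Spec_parse_changelog_py parse_changelog_py parse_changelog_py_alt
  cases s with
  | none => rfl
  | some t =>
    by_cases h0 : t = ""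
    · simp [h0]
    · by_cases ha : t = "auto"
      · simp [ha]
      · simp only [h0, ha, if_false]
        exact pvMain t
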